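-- pv_equiv track=rewrite | github.com/GuoshenLi/my_leetcode_python | 551.py | pending_s
-- ===== SOURCE A (Python) =====
-- def pending_s(s):
--     count = 0
--     res = 0
--     for i in range(len(s)):
--         if s[i] == "p":
--             count += 1
--         else:
--             res = max(res, count)
--             count = 0
--     return max(res, count)
-- ===== SOURCE B (Python) =====
-- def pending_s(s):
--     # Run-length encode the sequence, then reduce: max length among runs of "p".
--     runs = []
--     for c in s:
--         if runs and runs[-1][0] == c:
--             runs[-1][1] += 1
--         else:
--             runs.append([c, 1])
--     return max((n for c, n in runs if c == "p"), default=0)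
-- ===== Notes on version B (the rewrite author's own statement) =====
-- stated objective: alternative
-- what changed: B first builds the run-length encoding of the sequence and then takes the max over the lengths of the 'p' runs (with default 0), instead of A's single running counter with explicit reset and trailing-run max.
import Mathlib
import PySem

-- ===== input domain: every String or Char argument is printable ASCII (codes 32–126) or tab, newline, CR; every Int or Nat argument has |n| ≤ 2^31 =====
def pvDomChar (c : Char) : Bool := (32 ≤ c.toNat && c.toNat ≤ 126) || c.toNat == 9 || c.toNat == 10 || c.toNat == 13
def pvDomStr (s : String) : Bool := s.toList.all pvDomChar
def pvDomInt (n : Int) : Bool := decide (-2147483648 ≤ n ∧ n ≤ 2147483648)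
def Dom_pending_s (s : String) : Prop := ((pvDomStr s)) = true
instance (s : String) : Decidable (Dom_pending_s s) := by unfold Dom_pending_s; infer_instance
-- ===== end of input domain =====

-- B replaces A's running counter (with explicit reset and trailing-run max) by a
-- run-length encoding of the sequence followed by a max over the 'p'-run lengths.

-- ===== PORT A =====
def pending_s (s : String) : Int :=
  let st := s.toList.foldl (fun (cr : Int × Int) c =>
      if c = 'p' then (cr.1 + 1, cr.2) else (0, max cr.2 cr.1)) (0, 0)
  max st.2 st.1

-- ===== PORT B =====
-- one loop step of Source B: extend the last run if its key is c, else append a new run [c, 1]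
def pvRunStep (runs : List (Char × Int)) (c : Char) : List (Char × Int) :=
  match runs.getLast? with
  | some kn => if kn.1 = c then runs.dropLast ++ [(kn.1, kn.2 + 1)] else runs ++ [(c, 1)]
  | none => runs ++ [(c, 1)]

def pending_s_alt (s : String) : Int :=
  let runs := s.toList.foldl pvRunStep []
  PySem.List.maxD (runs.filterMap (fun kn => if kn.1 = 'p' then some kn.2 else none)) (fun n => n) 0

-- ===== PRECONDITION & SPEC =====
def Spec_pending_s (s : String) (out : Int) : Prop := out = pending_s_alt s
instance (s : String) (out : Int) : Decidable (Spec_pending_s s out) := by unfold Spec_pending_s; infer_instance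

-- ===== CLAIM (what is proved, stated in full; the proofs are below) =====
def Claim_equal_pending_s : Prop := ∀ (s : String), Dom_pending_s s → Spec_pending_s s (pending_s s)

-- ===== LEMMAS AND PROOFS =====
-- max of the 'p'-run lengths of rs, default 0
def pvMaxP (rs : List (Char × Int)) : Int :=
  (rs.filterMap (fun kn => if kn.1 = 'p' then some kn.2 else none)).foldl max 0

-- loop invariant tying A's (count, res) to B's run list:
-- count is the length of a trailing 'p' run (else 0), res is the max of the completed 'p' runs
def pvInv (runs : List (Char × Int)) (count res : Int) : Prop :=
  match runs.getLast? with
  | none => count = 0 ∧ res = 0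
  | some kn => if kn.1 = 'p' then count = kn.2 ∧ res = pvMaxP runs.dropLast
               else count = 0 ∧ res = pvMaxP runs

lemma pvMaxP_nil : pvMaxP [] = 0 := rfl

lemma pvMaxP_append (front : List (Char × Int)) (k : Char) (n : Int) :
    pvMaxP (front ++ [(k, n)]) = if k = 'p' then max (pvMaxP front) n else pvMaxP front := by
  unfold pvMaxP
  by_cases h : k = 'p' <;> simp [h, List.filterMap_append, List.foldl_append]

lemma pvMaxP_nonneg (rs : List (Char × Int)) : 0 ≤ pvMaxP rs := by
  unfold pvMaxP
  exact (PySem.List.le_foldl_max _ 0).1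

lemma pv_loop (l : List Char) : ∀ runs count res, pvInv runs count res →
    (max (l.foldl (fun (cr : Int × Int) c =>
      if c = 'p' then (cr.1 + 1, cr.2) else (0, max cr.2 cr.1)) (count, res)).2
      (l.foldl (fun (cr : Int × Int) c =>
      if c = 'p' then (cr.1 + 1, cr.2) else (0, max cr.2 cr.1)) (count, res)).1)
    = pvMaxP (l.foldl pvRunStep runs) := by
  induction l with
  | nil =>
    intro runs count res hInv
    simp only [List.foldl]
    unfold pvInv at hInv
    rcases hlast : runs.getLast? with _ | ⟨k, n⟩
    · rw [hlast] at hInv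
      simp [List.getLast?_eq_none_iff.mp hlast, hInv.1, hInv.2, pvMaxP_nil]
    · rw [hlast] at hInv
      have hruns : runs = runs.dropLast ++ [(k, n)] := by
        conv_lhs => rw [← List.dropLast_append_getLast? _ hlast]
      by_cases hk : k = 'p'
      · simp only [hk] at hInv
        rw [hInv.1, hInv.2]
        conv_rhs => rw [hruns]
        rw [pvMaxP_append]
        simp [hk]
      · simp only [hk] at hInv
        rw [hInv.1, hInv.2]
        simp [max_eq_left (pvMaxP_nonneg runs)]
  | cons c l ih =>
    intro runs count res hInv
    simp only [List.foldl]
    unfold pvInv at hInv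
    by_cases hc : c = 'p'
    · rw [if_pos hc]
      apply ih
      rcases hlast : runs.getLast? with _ | ⟨k, n⟩
      · rw [hlast] at hInv
        have hnil := List.getLast?_eq_none_iff.mp hlast
        unfold pvInv pvRunStep
        rw [hlast]
        simp [hnil, hc, hInv.1, hInv.2, pvMaxP_nil]
      · rw [hlast] at hInv
        have hruns : runs = runs.dropLast ++ [(k, n)] := by
          conv_lhs => rw [← List.dropLast_append_getLast? _ hlast]
        by_cases hk : k = 'p'
        · simp only [hk] at hInv
          unfold pvInv pvRunStep
          rw [hlast]
          have hkc : k = c := by rw [hk, hc]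
          simp only [hkc]
          simp [hc, hInv.1, hInv.2]
        · simp only [if_neg hk] at hInv
          unfold pvInv pvRunStep
          rw [hlast]
          have hne : k ≠ c := by rw [hc]; exact hk
          simp only [if_neg hne]
          simp [hc, hInv.1, hInv.2]
    · rw [if_neg hc]
      apply ih
      rcases hlast : runs.getLast? with _ | ⟨k, n⟩
      · rw [hlast] at hInv
        have hnil := List.getLast?_eq_none_iff.mp hlast
        unfold pvInv pvRunStep
        rw [hlast]
        simp [hnil, hc, hInv.1, hInv.2]
        simp [pvMaxP, hc]
      · rw [hlast] at hInv
        have hruns : runs = runs.dropLast ++ [(k, n)] := by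
          conv_lhs => rw [← List.dropLast_append_getLast? _ hlast]
        by_cases hk : k = c
        · have hkp : ¬ k = 'p' := by rw [hk]; exact hc
          simp only [if_neg hkp] at hInv
          unfold pvInv pvRunStep
          rw [hlast]
          simp only [if_pos hk]
          have h1 : (runs.dropLast ++ [(k, n + 1)]).getLast? = some (k, n + 1) := by simp
          rw [h1]
          simp only [if_neg hkp]
          refine ⟨trivial, ?_⟩
          rw [hInv.2, hInv.1]
          conv_lhs => rw [hruns]
          rw [pvMaxP_append, pvMaxP_append, if_neg hkp, if_neg hkp]
          exact max_eq_left (pvMaxP_nonneg _)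
        · unfold pvInv pvRunStep
          rw [hlast]
          simp only [if_neg hk]
          have h1 : (runs ++ [(c, 1)]).getLast? = some (c, 1) := by simp
          rw [h1]
          simp only [if_neg hc]
          refine ⟨trivial, ?_⟩
          rw [pvMaxP_append, if_neg hc]
          by_cases hkp : k = 'p'
          · simp only [if_pos hkp] at hInv
            rw [hInv.1, hInv.2]
            conv_rhs => rw [hruns]
            rw [pvMaxP_append, if_pos hkp]
          · simp only [if_neg hkp] at hInv
            rw [hInv.1, hInv.2]
            simp [max_eq_left (pvMaxP_nonneg runs)]

-- run lengths produced by Source B's loop are ≥ 1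
lemma pvRuns_pos (l : List Char) : ∀ runs, (∀ kn ∈ runs, (1 : Int) ≤ kn.2) →
    ∀ kn ∈ l.foldl pvRunStep runs, (1 : Int) ≤ kn.2 := by
  induction l with
  | nil => intro runs h; simpa using h
  | cons c l ih =>
    intro runs h
    simp only [List.foldl]
    apply ih
    intro kn hkn
    unfold pvRunStep at hkn
    rcases hlast : runs.getLast? with _ | ⟨k, n⟩ <;> rw [hlast] at hkn
    · rcases List.mem_append.mp hkn with h1 | h1
      · exact h _ h1
      · simp at h1; simp [h1]
    · have hn : (1 : Int) ≤ n := h _ (List.mem_of_getLast? hlast)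
      by_cases hk : k = c <;> simp only [hk, if_pos] at hkn
      · rcases List.mem_append.mp hkn with h1 | h1
        · exact h _ (List.dropLast_subset _ h1)
        · simp at h1; simp [h1]; omega
      · rcases List.mem_append.mp hkn with h1 | h1
        · exact h _ h1
        · simp at h1; simp [h1]
  
-- max(xs, default=0) is the running max from 0 when xs is nonnegative
lemma pvMaxD_eq_foldl (xs : List Int) (h : ∀ x ∈ xs, (0 : Int) ≤ x) :
    PySem.List.maxD xs (fun n => n) 0 = xs.foldl max 0 := by
  cases xs with
  | nil => rfl
  | cons x t =>
    unfold PySem.List.maxD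
    rw [PySem.List.max?_id_cons]
    simp only [Option.getD_some, List.foldl]
    have hx : max (0 : Int) x = x := max_eq_right (h x (by simp))
    rw [hx]

-- ===== VERDICT (by name: the statement is the Claim_ definition above) =====
theorem pending_s_spec : Claim_equal_pending_s := by
  unfold Claim_equal_pending_s Spec_pending_s pending_s pending_s_alt
  intro s _
  have hpos := pvRuns_pos s.toList [] (by simp)
  rw [pvMaxD_eq_foldl]
  · exact pv_loop s.toList [] 0 0 (by unfold pvInv; simp)
  · intro x hx
    rcases List.mem_filterMap.mp hx with ⟨kn, hmem, heq⟩
    by_cases hk : kn.1 = 'p'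
    · rw [if_pos hk] at heq
      have h1 := hpos kn hmem
      injection heq with h2
      omega
    · rw [if_neg hk] at heq; cases heq
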